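-- pv_equiv track=rewrite | github.com/kanitsch/ASD | egz_probne/egzP8a/egzP8a.py | reklamy_wz
-- ===== SOURCE A (Python) =====
-- def find(tab,l,p,x):
--     mid=(l+p)//2
--     if l==p:
--         return p
--     if tab[mid][0]<=x:
--         if mid+1<p and tab[mid+1][0]>x:
--             return mid+1
--         return find(tab,mid+1,p,x)
--     if mid-1>=0 and tab[mid-1][0]<x:
--         return mid
--     return find(tab,l,mid,x)
--
-- def reklamy_wz(T,S,o):
--     n=len(T)
--     for i in range(n):
--         T[i]=(T[i][0],T[i][1],S[i])
--     T.sort()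
--     dp=[0 for _ in range(n)]
--     dp[n-1]=T[n-1][2]
--     maxx=0
--     for i in range(n-2,-1,-1):
--         dp[i]=max(dp[i+1],T[i][2])
--         maxx=max(maxx,dp[i])
--     for i in range(n):
--         j=find(T,0,n,T[i][1])
--         if j<n:
--             maxx=max(T[i][2]+dp[j],maxx)
--     return maxx
-- ===== SOURCE B (Python) =====
-- def reklamy_wz(T, S, o):
--     # Max revenue from at most one ad, or from two non-overlapping ads.
--     # One two-pointer sweep in end order replaces per-interval binary search.
--     # T is mutated in place into sorted (start, end, revenue) triples.
--     n = len(T)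
--     for i in range(n):
--         T[i] = (T[i][0], T[i][1], S[i])
--     T.sort()
--     # suffix maxima of revenue, built by a running max over the reversed list
--     suf = []
--     acc = T[-1][2]
--     for t in reversed(T):
--         acc = max(acc, t[2])
--         suf.append(acc)
--     suf.reverse()
--     best = max(0, acc)  # take no ad, or the single best ad
--     # sweep ends in ascending order; p only ever advances
--     p = 0
--     for s, e, r in sorted(T, key=lambda t: t[1]):
--         while p < n and T[p][0] <= e:
--             p += 1
--         if p < n:
--             best = max(best, r + suf[p])
--     return best
-- ===== Notes on version B (the rewrite author's own statement) =====
-- stated objective: alternative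
-- what changed: B replaces A's per-interval recursive binary search (find) and running dp list by a single two-pointer merge-style sweep: intervals are processed in ascending end order while one pointer advances monotonically over the start-sorted list, paired with a suffix-maximum array built by a reversed running max; Pre_ excludes empty T and S shorter than T, on which A raises IndexError.
-- intended difference: On a single proper interval (len(T)==1, start<=end) with positive revenue A returns 0 because the loop seeding maxx with single-ad revenues never runs for n==1, while B returns that revenue, the intended best single-ad choice (A itself counts single-ad revenues whenever n>=2). — e.g. on reklamy_wz([(0, 1)], [5], 0): A returns 0, B returns 5
import Mathlib
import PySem

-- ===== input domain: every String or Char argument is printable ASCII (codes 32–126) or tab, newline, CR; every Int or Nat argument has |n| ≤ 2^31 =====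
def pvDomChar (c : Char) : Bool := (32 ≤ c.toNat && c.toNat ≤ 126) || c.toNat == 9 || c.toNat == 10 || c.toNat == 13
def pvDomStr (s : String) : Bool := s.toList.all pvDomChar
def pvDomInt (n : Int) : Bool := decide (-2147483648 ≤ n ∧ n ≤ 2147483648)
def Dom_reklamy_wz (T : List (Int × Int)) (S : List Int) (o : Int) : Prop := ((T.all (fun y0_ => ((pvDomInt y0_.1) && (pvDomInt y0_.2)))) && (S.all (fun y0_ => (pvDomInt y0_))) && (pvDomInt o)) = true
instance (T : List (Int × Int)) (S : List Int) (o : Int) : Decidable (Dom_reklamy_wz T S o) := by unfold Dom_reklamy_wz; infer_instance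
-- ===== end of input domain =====

-- B replaces A's per-interval recursive binary search by a single two-pointer
-- sweep over the intervals in end order (objective: alternative decomposition).
-- Both Pythons mutate T in place into sorted 3-tuples; the theorems are about
-- the return value (the mutation is identical in A and B).

-- ===== PORT A =====
-- both Pythons build (start, end, revenue) triples and call T.sort();
-- Python's lexicographic tuple sort is ported exactly as three stable
-- sorts, least-significant key first (stable radix decomposition of lex order)
def pvSort3 (T : List (Int × Int)) (S : List Int) : List (Int × Int × Int) :=
  PySem.List.sorted (PySem.List.sorted (PySem.List.sorted
      ((PySem.List.pyRange 0 (T.length : Int)).map (fun i =>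
        ((PySem.List.pyGetD T i (0, 0)).1, (PySem.List.pyGetD T i (0, 0)).2,
          PySem.List.pyGetD S i 0)))
      (fun t => t.2.2)) (fun t => t.2.1)) (fun t => t.1)

-- A's recursive `find`; Python recursion carries no fuel, but every recursive
-- call strictly shrinks p - l (which starts at len(tab)), so fuel = len + 1 is
-- never exhausted on the calls A makes; every tab access in A is in range
def pvFindA (fuel : Nat) (tab : List (Int × Int × Int)) (l p x : Int) : Int :=
  match fuel with
  | 0 => p
  | fuel + 1 =>
    let mid := PySem.Int.floordiv (l + p) 2
    if l = p then p
    else if (PySem.List.pyGetD tab mid (0, 0, 0)).1 ≤ x then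
      (if mid + 1 < p ∧ (PySem.List.pyGetD tab (mid + 1) (0, 0, 0)).1 > x then mid + 1
       else pvFindA fuel tab (mid + 1) p x)
    else if mid - 1 ≥ 0 ∧ (PySem.List.pyGetD tab (mid - 1) (0, 0, 0)).1 < x then mid
    else pvFindA fuel tab l mid x

-- body of A's backward dp loop: dp[i]=max(dp[i+1],T[i][2]); maxx=max(maxx,dp[i])
def pvDpBody (U : List (Int × Int × Int)) (st : List Int × Int) (i : Int) : List Int × Int :=
  let dp := PySem.List.pySetD st.1 i
      (max (PySem.List.pyGetD st.1 (i + 1) 0) (PySem.List.pyGetD U i (0, 0, 0)).2.2)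
  (dp, max st.2 (PySem.List.pyGetD dp i 0))

-- body of A's second loop, as a function of the fetched element T[i]
def pvPairF (U : List (Int × Int × Int)) (dp : List Int) (n maxx : Int)
    (t : Int × Int × Int) : Int :=
  let j := pvFindA (U.length + 1) U 0 n t.2.1
  if j < n then max (t.2.2 + PySem.List.pyGetD dp j 0) maxx else maxx

def reklamy_wz (T : List (Int × Int)) (S : List Int) (o : Int) : Int :=
  let n : Int := (T.length : Int)
  let U := pvSort3 T S
  let dp0 : List Int := (PySem.List.pyRange 0 n).map (fun _ => 0)
  let dp1 := PySem.List.pySetD dp0 (n - 1) (PySem.List.pyGetD U (n - 1) (0, 0, 0)).2.2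
  let st := (PySem.List.pyRange (n - 2) (-1) (-1)).foldl (pvDpBody U) (dp1, 0)
  (PySem.List.pyRange 0 n).foldl
    (fun maxx i => pvPairF U st.1 n maxx (PySem.List.pyGetD U i (0, 0, 0))) st.2

-- ===== PORT B =====
-- suffix loop body: acc = max(acc, t[2]); suf.append(acc)
def pvSufBody (st : Int × List Int) (t : Int × Int × Int) : Int × List Int :=
  let a := max st.1 t.2.2
  (a, st.2 ++ [a])

-- the two-pointer advance: while p < n and T[p][0] <= e: p += 1
def pvAdvance (U : List (Int × Int × Int)) (e : Int) (p : Nat) : Nat :=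
  if h : p < U.length then
    if (U[p]'h).1 ≤ e then pvAdvance U e (p + 1) else p
  else p
termination_by U.length - p

-- sweep body: advance the pointer, then try r + suf[p]
def pvSweepBody (U : List (Int × Int × Int)) (suf : List Int) (pb : Nat × Int)
    (t : Int × Int × Int) : Nat × Int :=
  let p := pvAdvance U t.2.1 pb.1
  (p, if p < U.length then max pb.2 (t.2.2 + PySem.List.pyGetD suf (p : Int) 0) else pb.2)

def reklamy_wz_alt (T : List (Int × Int)) (S : List Int) (o : Int) : Int :=
  let U := pvSort3 T S
  let st := U.reverse.foldl pvSufBody ((PySem.List.pyGetD U (-1) (0, 0, 0)).2.2, [])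
  let suf := st.2.reverse
  let best : Int := max 0 st.1
  ((PySem.List.sorted U (fun t => t.2.1)).foldl (pvSweepBody U suf) (0, best)).2

-- ===== PRECONDITION & SPEC =====
-- Pre_ excludes exactly the inputs on which A raises IndexError:
-- an empty T (dp[n-1] = dp[-1] on an empty dp) and S shorter than T (S[i]).
def Pre_reklamy_wz (T : List (Int × Int)) (S : List Int) (o : Int) : Prop :=
  T ≠ [] ∧ T.length ≤ S.length
instance (T : List (Int × Int)) (S : List Int) (o : Int) : Decidable (Pre_reklamy_wz T S o) := by
  unfold Pre_reklamy_wz; infer_instance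

def pvWitness_reklamy_wz : (List (Int × Int)) × List Int × Int := ([(0, 1), (2, 3)], [4, 5], 0)

-- On a single proper interval (len(T)=1, start ≤ end) with positive revenue A
-- returns 0 — its maxx-seeding loop over dp[0..n-2] never runs when n=1 — while
-- B returns that revenue, the intended best single-ad value (A itself counts
-- single-ad revenues whenever n ≥ 2).
def D_reklamy_wz (T : List (Int × Int)) (S : List Int) (o : Int) : Prop :=
  T.length = 1 ∧ (T.headD (0, 0)).1 ≤ (T.headD (0, 0)).2 ∧ 0 < S.headD 0
instance (T : List (Int × Int)) (S : List Int) (o : Int) : Decidable (D_reklamy_wz T S o) := by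
  unfold D_reklamy_wz; infer_instance

def Spec_reklamy_wz (T : List (Int × Int)) (S : List Int) (o : Int) (out : Int) : Prop :=
  ¬ D_reklamy_wz T S o → out = reklamy_wz_alt T S o
instance (T : List (Int × Int)) (S : List Int) (o : Int) (out : Int) :
    Decidable (Spec_reklamy_wz T S o out) := by unfold Spec_reklamy_wz; infer_instance

def pvDiffWitness_reklamy_wz : (List (Int × Int)) × List Int × Int := ([(0, 1)], [5], 0)
def pvDiffWitnessOut_reklamy_wz : Int × Int := (0, 5)

-- ===== CLAIM (what is proved, stated in full; the proofs are below) =====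
def Claim_unchanged_reklamy_wz : Prop := ∀ (T : List (Int × Int)) (S : List Int) (o : Int),
  Dom_reklamy_wz T S o → Pre_reklamy_wz T S o → Spec_reklamy_wz T S o (reklamy_wz T S o)
def Claim_changed_reklamy_wz : Prop := Dom_reklamy_wz (pvDiffWitness_reklamy_wz.1) (pvDiffWitness_reklamy_wz.2.1) (pvDiffWitness_reklamy_wz.2.2) ∧ Pre_reklamy_wz (pvDiffWitness_reklamy_wz.1) (pvDiffWitness_reklamy_wz.2.1) (pvDiffWitness_reklamy_wz.2.2) ∧ D_reklamy_wz (pvDiffWitness_reklamy_wz.1) (pvDiffWitness_reklamy_wz.2.1) (pvDiffWitness_reklamy_wz.2.2) ∧ reklamy_wz (pvDiffWitness_reklamy_wz.1) (pvDiffWitness_reklamy_wz.2.1) (pvDiffWitness_reklamy_wz.2.2) = pvDiffWitnessOut_reklamy_wz.1 ∧ reklamy_wz_alt (pvDiffWitness_reklamy_wz.1) (pvDiffWitness_reklamy_wz.2.1) (pvDiffWitness_reklamy_wz.2.2) = pvDiffWitnessOut_reklamy_wz.2 ∧ pvDiffWitnessOut_reklamy_wz.1 ≠ pvDiffWitnessO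ut_reklamy_wz.2
def Claim_exact_reklamy_wz : Prop := ∀ (T : List (Int × Int)) (S : List Int) (o : Int),
  Dom_reklamy_wz T S o → Pre_reklamy_wz T S o → D_reklamy_wz T S o → reklamy_wz T S o ≠ reklamy_wz_alt T S o

-- ===== LEMMAS AND PROOFS =====

-- max revenue over a (suffix of the) sorted list; 0 on [] (never used there)
def pvSm : List (Int × Int × Int) → Int
  | [] => 0
  | [t] => t.2.2
  | t :: ts => max (pvSm ts) t.2.2

-- the list of suffix maxima, for k = length-1 down to 0
def pvDs : List (Int × Int × Int) → List Int
  | [] => []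
  | t :: ts => pvDs ts ++ [pvSm (t :: ts)]

-- first index whose start exceeds x (length if none)
def pvBnd : List (Int × Int × Int) → Int → Nat
  | [], _ => 0
  | t :: ts, x => if x < t.1 then 0 else pvBnd ts x + 1

-- the common abstract loop body both second loops are reduced to
def pvG (U : List (Int × Int × Int)) (acc : Int) (t : Int × Int × Int) : Int :=
  if pvBnd U t.2.1 < U.length then max (t.2.2 + pvSm (U.drop (pvBnd U t.2.1))) acc else acc

theorem pvSm_cons {t : Int × Int × Int} {ts : List (Int × Int × Int)} (h : ts ≠ []) :
    pvSm (t :: ts) = max (pvSm ts) t.2.2 := by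
  cases ts with
  | nil => exact absurd rfl h
  | cons u us => rfl

theorem pvSm_drop_eq (U : List (Int × Int × Int)) (k : Nat) (h : k + 1 < U.length) :
    pvSm (U.drop k) = max (pvSm (U.drop (k + 1))) ((U[k]'(by omega)).2.2) := by
  rw [← List.getElem_cons_drop (as := U) (i := k) (by omega)]
  exact pvSm_cons (by
    intro hnil
    have := List.length_drop (l := U) (i := k + 1)
    rw [hnil] at this; simp at this; omega)

theorem pvSm_drop_last (U : List (Int × Int × Int)) (k : Nat) (h : U.length = k + 1) :
    pvSm (U.drop k) = (U[k]'(by omega)).2.2 := by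
  have h2 : U.drop (k + 1) = [] := by
    apply List.eq_nil_of_length_eq_zero
    simp [List.length_drop]; omega
  rw [← List.getElem_cons_drop (as := U) (i := k) (by omega), h2]
  rfl

theorem pvSm_drop_le (U : List (Int × Int × Int)) (j k : Nat) (hjk : j ≤ k)
    (hk : k < U.length) : pvSm (U.drop k) ≤ pvSm (U.drop j) := by
  induction k, hjk using Nat.le_induction with
  | base => exact le_refl _
  | succ k hjk ih =>
    have h1 : pvSm (U.drop (k + 1)) ≤ pvSm (U.drop k) := by
      rw [pvSm_drop_eq U k hk]; exact le_max_left _ _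
    exact le_trans h1 (ih (by omega))

theorem pvBnd_le_length (U : List (Int × Int × Int)) (x : Int) : pvBnd U x ≤ U.length := by
  induction U with
  | nil => simp [pvBnd]
  | cons t ts ih => simp only [pvBnd, List.length_cons]; split <;> omega

theorem pvBnd_mono (U : List (Int × Int × Int)) {x y : Int} (h : x ≤ y) :
    pvBnd U x ≤ pvBnd U y := by
  induction U with
  | nil => simp [pvBnd]
  | cons t ts ih =>
    simp only [pvBnd]
    split <;> split <;> omega

theorem pvLt_bnd (U : List (Int × Int × Int)) (x : Int) (k : Nat) (hk : k < pvBnd U x)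
    (hl : k < U.length) : (U[k]'hl).1 ≤ x := by
  induction U generalizing k with
  | nil => cases hl
  | cons t ts ih =>
    simp only [pvBnd] at hk
    split at hk
    · omega
    · rename_i hx
      cases k with
      | zero => simpa using le_of_not_gt hx
      | succ k => exact ih k (by omega) (by simpa using hl)

theorem pvBnd_lt (U : List (Int × Int × Int)) (x : Int) (h : pvBnd U x < U.length) :
    x < (U[pvBnd U x]'h).1 := by
  induction U with
  | nil => cases h
  | cons t ts ih =>
    by_cases hx : x < t.1
    · simp only [pvBnd, if_pos hx]; simpa using hx
    · have hb : pvBnd (t :: ts) x = pvBnd ts x + 1 := by simp [pvBnd, hx]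
      have h2 : pvBnd ts x < ts.length := by
        have := hb ▸ h; simpa using this
      have := ih h2
      simp only [hb]
      simpa using this

theorem pvLt_of_bnd_le (U : List (Int × Int × Int)) (x : Int)
    (hs : U.Pairwise (fun a b => a.1 ≤ b.1)) (k : Nat) (hl : k < U.length)
    (h : pvBnd U x ≤ k) : x < (U[k]'hl).1 := by
  have hb : pvBnd U x < U.length := lt_of_le_of_lt h hl
  rcases Nat.eq_or_lt_of_le h with h1 | h1
  · subst h1; exact pvBnd_lt U x hl
  · have hpair := (List.pairwise_iff_getElem.mp hs) _ _ hb hl h1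
    exact lt_of_lt_of_le (pvBnd_lt U x hb) hpair

theorem pvLt_bnd_of_le (U : List (Int × Int × Int)) (x : Int)
    (hs : U.Pairwise (fun a b => a.1 ≤ b.1)) (k : Nat) (hl : k < U.length)
    (h : (U[k]'hl).1 ≤ x) : k < pvBnd U x := by
  by_contra h'
  exact absurd h (not_le.mpr (pvLt_of_bnd_le U x hs k hl (by omega)))

theorem pvBnd_le_of_lt (U : List (Int × Int × Int)) (x : Int)
    (hs : U.Pairwise (fun a b => a.1 ≤ b.1)) (k : Nat) (hl : k < U.length)
    (h : x < (U[k]'hl).1) : pvBnd U x ≤ k := by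
  by_contra h'
  exact absurd (pvLt_bnd U x k (by omega) hl) (not_le.mpr h)

-- A's binary search computes pvBnd
theorem pvFindA_eq_bnd (fuel : Nat) (U : List (Int × Int × Int)) (x l p : Int)
    (hs : U.Pairwise (fun a b => a.1 ≤ b.1)) (h0 : 0 ≤ l) (hlp : l ≤ p)
    (hp : p ≤ (U.length : Int)) (hbl : l ≤ (pvBnd U x : Int))
    (hbp : (pvBnd U x : Int) ≤ p) (hf : (p - l).toNat ≤ fuel) :
    pvFindA fuel U l p x = (pvBnd U x : Int) := by
  induction fuel generalizing l p with
  | zero => simp only [pvFindA]; omega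
  | succ fuel ih =>
    by_cases hlp' : l = p
    · simp only [pvFindA, if_pos hlp']; omega
    · have hlt : l < p := lt_of_le_of_ne hlp hlp'
      have hb := PySem.Int.floordiv_two_mid_bounds (le_of_lt hlt)
      have hmlt : PySem.Int.floordiv (l + p) 2 < p := by
        rw [PySem.Int.floordiv_lt_iff_lt_mul (by norm_num)]; omega
      have hmid0 : 0 ≤ PySem.Int.floordiv (l + p) 2 := le_trans h0 hb.1
      have hmlen : PySem.Int.floordiv (l + p) 2 < (U.length : Int) := lt_of_lt_of_le hmlt hp
      have hgm : PySem.List.pyGetD U (PySem.Int.floordiv (l + p) 2) (0, 0, 0) =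
          U[(PySem.Int.floordiv (l + p) 2).toNat]'(by omega) :=
        PySem.List.pyGetD_eq_getElem U _ hmid0 hmlen
      simp only [pvFindA, if_neg hlp']
      by_cases hc1 : (PySem.List.pyGetD U (PySem.Int.floordiv (l + p) 2) (0, 0, 0)).1 ≤ x
      · rw [if_pos hc1]
        have hlt_bnd : (PySem.Int.floordiv (l + p) 2).toNat < pvBnd U x :=
          pvLt_bnd_of_le U x hs _ (by omega) (by rw [hgm] at hc1; exact hc1)
        by_cases hc2 : PySem.Int.floordiv (l + p) 2 + 1 < p ∧
            (PySem.List.pyGetD U (PySem.Int.floordiv (l + p) 2 + 1) (0, 0, 0)).1 > x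
        · rw [if_pos hc2]
          have hg2 : PySem.List.pyGetD U (PySem.Int.floordiv (l + p) 2 + 1) (0, 0, 0) =
              U[(PySem.Int.floordiv (l + p) 2 + 1).toNat]'(by omega) :=
            PySem.List.pyGetD_eq_getElem U _ (by omega) (by omega)
          have hble : pvBnd U x ≤ (PySem.Int.floordiv (l + p) 2 + 1).toNat :=
            pvBnd_le_of_lt U x hs _ (by omega) (by rw [hg2] at hc2; exact hc2.2)
          omega
        · rw [if_neg hc2]
          exact ih _ _ (by omega) (by omega) hp (by omega) hbp (by omega)
      · rw [if_neg hc1]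
        have hble : pvBnd U x ≤ (PySem.Int.floordiv (l + p) 2).toNat :=
          pvBnd_le_of_lt U x hs _ (by omega) (by rw [hgm] at hc1; omega)
        by_cases hc3 : PySem.Int.floordiv (l + p) 2 - 1 ≥ 0 ∧
            (PySem.List.pyGetD U (PySem.Int.floordiv (l + p) 2 - 1) (0, 0, 0)).1 < x
        · rw [if_pos hc3]
          have hg3 : PySem.List.pyGetD U (PySem.Int.floordiv (l + p) 2 - 1) (0, 0, 0) =
              U[(PySem.Int.floordiv (l + p) 2 - 1).toNat]'(by omega) :=
            PySem.List.pyGetD_eq_getElem U _ hc3.1 (by omega)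
          have hgt : ¬ pvBnd U x ≤ (PySem.Int.floordiv (l + p) 2 - 1).toNat := by
            intro hcon
            have := pvLt_of_bnd_le U x hs _ (by omega) hcon
            rw [← hg3] at this
            omega
          omega
        · rw [if_neg hc3]
          exact ih _ _ h0 (by omega) (by omega) hbl (by omega) (by omega)

theorem pvSetGet (dp : List Int) (i : Int) (v : Int) (m : Nat) (h0 : 0 ≤ i)
    (h1 : i < (dp.length : Int)) :
    PySem.List.pyGetD (PySem.List.pySetD dp i v) (m : Int) 0 =
      if (m : Int) = i then v else PySem.List.pyGetD dp (m : Int) 0 := by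
  have hi : i = ((i.toNat : Nat) : Int) := by omega
  rw [hi, PySem.List.pyGetD_pySetD_natCast dp i.toNat m v 0 (by omega)]
  split_ifs <;> first | rfl | omega

-- the dp loop fills dp with suffix maxima and maxx with max(maxx, pvSm U)
theorem pvDpLoop (U : List (Int × Int × Int)) (a : Nat) (dp : List Int) (maxx : Int)
    (ha : (a : Int) ≤ (U.length : Int) - 2) (hlen : dp.length = U.length)
    (hdp : ∀ k : Nat, a < k → k < U.length → PySem.List.pyGetD dp (k : Int) 0 = pvSm (U.drop k)) :
    (∀ k : Nat, k < U.length →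
      PySem.List.pyGetD ((PySem.List.pyRange (a : Int) (-1) (-1)).foldl (pvDpBody U) (dp, maxx)).1 (k : Int) 0 = pvSm (U.drop k)) ∧
    ((PySem.List.pyRange (a : Int) (-1) (-1)).foldl (pvDpBody U) (dp, maxx)).2 = max maxx (pvSm U) := by
  induction a generalizing dp maxx with
  | zero =>
    rw [PySem.List.pyRange_neg_one_cons (by omega), PySem.List.pyRange_neg_one_eq_nil (by omega)]
    simp only [List.foldl_cons, List.foldl_nil, pvDpBody, Nat.cast_zero]
    have hlen2 : 2 ≤ U.length := by omega
    have hg1 : PySem.List.pyGetD dp ((0 : Int) + 1) 0 = pvSm (U.drop 1) := by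
      have := hdp 1 (by omega) (by omega)
      simpa using this
    have hgU : PySem.List.pyGetD U (0 : Int) (0, 0, 0) = U[0]'(by omega) :=
      PySem.List.pyGetD_eq_getElem U _ (by omega) (by exact_mod_cast (by omega : (0:Int) < (U.length:Int)))
    have hv : max (PySem.List.pyGetD dp ((0 : Int) + 1) 0) (PySem.List.pyGetD U (0 : Int) (0, 0, 0)).2.2 = pvSm U := by
      rw [hg1, hgU]
      have h0' := pvSm_drop_eq U 0 (by omega)
      simp only [List.drop_zero] at h0'
      exact h0'.symm
    constructor
    · intro k hk
      rw [pvSetGet dp 0 _ k (by omega) (by omega), hv]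
      by_cases hk0 : k = 0
      · subst hk0; simp [List.drop_zero]
      · rw [if_neg (by omega)]
        exact hdp k (by omega) hk
    · have h := pvSetGet dp 0 (max (PySem.List.pyGetD dp (0 + 1) 0)
        (PySem.List.pyGetD U 0 (0, 0, 0)).2.2) 0 (by omega) (by omega)
      simp only [Nat.cast_zero] at h
      rw [h, if_pos trivial, hv]
  | succ a ih =>
    have hcast : ((a + 1 : Nat) : Int) - 1 = (a : Int) := by push_cast; ring
    rw [PySem.List.pyRange_neg_one_cons (by omega), hcast]
    simp only [List.foldl_cons]
    have hrange : (a : Nat) + 1 < U.length := by omega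
    have hg1 : PySem.List.pyGetD dp (((a + 1 : Nat) : Int) + 1) 0 = pvSm (U.drop (a + 2)) := by
      have := hdp (a + 2) (by omega) (by omega)
      have hc : (((a + 2 : Nat)) : Int) = ((a + 1 : Nat) : Int) + 1 := by push_cast; ring
      rw [hc] at this
      exact this
    have hgU : PySem.List.pyGetD U ((a + 1 : Nat) : Int) (0, 0, 0) = U[a + 1]'hrange :=
      PySem.List.pyGetD_eq_getElem U _ (by omega) (by exact_mod_cast (by omega : ((a+1:Nat):Int) < (U.length:Int)))
    have hv : max (PySem.List.pyGetD dp (((a + 1 : Nat) : Int) + 1) 0)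
        (PySem.List.pyGetD U ((a + 1 : Nat) : Int) (0, 0, 0)).2.2 = pvSm (U.drop (a + 1)) := by
      rw [hg1, hgU, pvSm_drop_eq U (a + 1) (by omega)]
    simp only [pvDpBody]
    have hstep := ih (PySem.List.pySetD dp ((a + 1 : Nat) : Int)
        (max (PySem.List.pyGetD dp (((a + 1 : Nat) : Int) + 1) 0)
          (PySem.List.pyGetD U ((a + 1 : Nat) : Int) (0, 0, 0)).2.2))
      (max maxx (PySem.List.pyGetD (PySem.List.pySetD dp ((a + 1 : Nat) : Int)
        (max (PySem.List.pyGetD dp (((a + 1 : Nat) : Int) + 1) 0)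
          (PySem.List.pyGetD U ((a + 1 : Nat) : Int) (0, 0, 0)).2.2))
        ((a + 1 : Nat) : Int) 0))
      (by omega)
      (by rw [PySem.List.length_pySetD]; exact hlen)
      (by
        intro k hak hkl
        rw [pvSetGet dp _ _ k (by omega) (by omega)]
        by_cases hk : k = a + 1
        · subst hk; rw [if_pos (by push_cast; ring), hv]
        · rw [if_neg (by omega)]
          exact hdp k (by omega) hkl)
    refine ⟨hstep.1, ?_⟩
    rw [hstep.2]
    have hga : PySem.List.pyGetD (PySem.List.pySetD dp ((a + 1 : Nat) : Int)
        (max (PySem.List.pyGetD dp (((a + 1 : Nat) : Int) + 1) 0)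
          (PySem.List.pyGetD U ((a + 1 : Nat) : Int) (0, 0, 0)).2.2))
        ((a + 1 : Nat) : Int) 0 = pvSm (U.drop (a + 1)) := by
      have := pvSetGet dp ((a + 1 : Nat) : Int)
        (max (PySem.List.pyGetD dp (((a + 1 : Nat) : Int) + 1) 0)
          (PySem.List.pyGetD U ((a + 1 : Nat) : Int) (0, 0, 0)).2.2) (a + 1) (by omega) (by omega)
      rw [this, if_pos rfl, hv]
    rw [hga, max_assoc]
    congr 1
    have hle : pvSm (U.drop (a + 1)) ≤ pvSm U := by
      have := pvSm_drop_le U 0 (a + 1) (by omega) (by omega)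
      simpa using this
    exact max_eq_right hle

-- B's reversed running-max loop computes (pvSm U, suffix maxima descending)
theorem pvSufLoop (U : List (Int × Int × Int)) (init : Int) (l : List Int) (h : U ≠ [])
    (hinit : init ≤ (U.getLast h).2.2) :
    U.reverse.foldl pvSufBody (init, l) = (pvSm U, l ++ pvDs U) := by
  induction U generalizing l with
  | nil => exact absurd rfl h
  | cons t ts ih =>
    cases ts with
    | nil =>
      simp only [List.reverse_cons, List.reverse_nil, List.nil_append, List.foldl_cons,
        List.foldl_nil, pvSufBody, pvDs, pvSm]
      have : max init t.2.2 = t.2.2 := max_eq_right (by simpa using hinit)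
      rw [this]
    | cons u us =>
      have hts : (u :: us : List (Int × Int × Int)) ≠ [] := by simp
      have hlast : (u :: us : List (Int × Int × Int)).getLast hts = ((t :: u :: us).getLast h) := by
        exact (List.getLast_cons hts).symm
      have ih' := ih (l := l) hts (by rw [hlast]; exact hinit)
      rw [List.reverse_cons, List.foldl_append, ih']
      simp only [List.foldl_cons, List.foldl_nil, pvSufBody]
      rw [← pvSm_cons (t := t) hts]
      simp [pvDs, List.append_assoc]

theorem pvDs_rev_getD (U : List (Int × Int × Int)) (k : Nat) (hk : k < U.length) :
    PySem.List.pyGetD (pvDs U).reverse (k : Int) 0 = pvSm (U.drop k) := by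
  induction U generalizing k with
  | nil => cases hk
  | cons t ts ih =>
    have hrev : (pvDs (t :: ts)).reverse = pvSm (t :: ts) :: (pvDs ts).reverse := by
      simp [pvDs]
    rw [hrev, PySem.List.pyGetD_natCast]
    cases k with
    | zero => simp
    | succ k =>
      have ihk := ih k (by simpa using hk)
      rw [PySem.List.pyGetD_natCast] at ihk
      simpa using ihk

theorem pvAdvance_eq_bnd (U : List (Int × Int × Int)) (e : Int) (p : Nat)
    (hs : U.Pairwise (fun a b => a.1 ≤ b.1)) (hp : p ≤ pvBnd U e) :
    pvAdvance U e p = pvBnd U e := by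
  revert hp
  induction p using pvAdvance.induct (U := U) (e := e) with
  | case1 p hlt hle ih =>
    intro hp
    rw [pvAdvance, dif_pos hlt, if_pos hle]
    exact ih (pvLt_bnd_of_le U e hs p hlt hle)
  | case2 p hlt hle =>
    intro hp
    rw [pvAdvance, dif_pos hlt, if_neg hle]
    have := pvBnd_le_of_lt U e hs p hlt (by omega)
    omega
  | case3 p hlt =>
    intro hp
    rw [pvAdvance, dif_neg hlt]
    have := pvBnd_le_length U e
    omega

-- the sweep is the abstract fold pvG, provided ends are processed in ascending order
theorem pvSweepLoop (U : List (Int × Int × Int)) (suf : List Int)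
    (hs : U.Pairwise (fun a b => a.1 ≤ b.1))
    (hsuf : ∀ k : Nat, k < U.length → PySem.List.pyGetD suf (k : Int) 0 = pvSm (U.drop k))
    (E : List (Int × Int × Int)) (hE : E.Pairwise (fun a b => a.2.1 ≤ b.2.1))
    (p : Nat) (acc : Int) (hp : ∀ t ∈ E, p ≤ pvBnd U t.2.1) :
    (E.foldl (pvSweepBody U suf) (p, acc)).2 = E.foldl (pvG U) acc := by
  induction E generalizing p acc with
  | nil => rfl
  | cons t es ih =>
    obtain ⟨hhead, htail⟩ := List.pairwise_cons.mp hE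
    simp only [List.foldl_cons, pvSweepBody]
    rw [pvAdvance_eq_bnd U t.2.1 p hs (hp t (by simp))]
    have hbody : (if pvBnd U t.2.1 < U.length then
        max acc (t.2.2 + PySem.List.pyGetD suf ((pvBnd U t.2.1 : Nat) : Int) 0) else acc) =
        pvG U acc t := by
      unfold pvG
      split_ifs with hlt
      · rw [hsuf _ hlt, max_comm]
      · rfl
    rw [hbody]
    exact ih htail _ _ (fun t' ht' => le_trans (pvBnd_mono U (hhead t' ht')) (le_refl _))

theorem pvG_rcomm (U : List (Int × Int × Int)) (b : Int) (x y : Int × Int × Int) :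
    pvG U (pvG U b x) y = pvG U (pvG U b y) x := by
  unfold pvG; split_ifs <;> simp [max_left_comm, max_comm]

theorem pvSort3_length (T : List (Int × Int)) (S : List Int) :
    (pvSort3 T S).length = T.length := by
  simp [pvSort3, PySem.List.length_sorted, PySem.List.length_pyRange_one]

theorem pvSort3_pairwise (T : List (Int × Int)) (S : List Int) :
    (pvSort3 T S).Pairwise (fun a b => a.1 ≤ b.1) := by
  unfold pvSort3
  exact PySem.List.sorted_pairwise _ (fun t : Int × Int × Int => t.1)

theorem pvDp0_length (n : Int) : (((PySem.List.pyRange 0 n).map (fun _ => (0 : Int)))).length = n.toNat := by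
  simp [PySem.List.length_pyRange_one]

-- the initial dp (only index length-1 set) agrees with the suffix maxima there
theorem pvDp1_char (U : List (Int × Int × Int)) (hne : U ≠ []) (k : Nat) (hk : k < U.length)
    (hk1 : U.length - 1 ≤ k) :
    PySem.List.pyGetD (PySem.List.pySetD ((PySem.List.pyRange 0 (U.length : Int)).map (fun _ => (0 : Int)))
        ((U.length : Int) - 1) (PySem.List.pyGetD U ((U.length : Int) - 1) (0, 0, 0)).2.2) (k : Int) 0 =
      pvSm (U.drop k) := by
  have hpos : 0 < U.length := List.length_pos_iff.mpr hne
  have hkk : k = U.length - 1 := by omega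
  subst hkk
  have hdp0 := pvDp0_length (U.length : Int)
  rw [pvSetGet _ _ _ (U.length - 1) (by omega) (by rw [hdp0]; omega
      ), if_pos (by omega)]
  have hg : PySem.List.pyGetD U ((U.length : Int) - 1) (0, 0, 0) = U[U.length - 1]'(by omega) := by
    rw [PySem.List.pyGetD_eq_getElem U _ (by omega) (by omega)]
    congr 1
    omega
  rw [hg]
  exact (pvSm_drop_last U (U.length - 1) (by omega)).symm

-- A's second loop is the abstract fold pvG
theorem pvA_second (U : List (Int × Int × Int)) (dp : List Int) (maxx : Int)
    (hsort : U.Pairwise (fun a b => a.1 ≤ b.1))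
    (hdp : ∀ k : Nat, k < U.length → PySem.List.pyGetD dp (k : Int) 0 = pvSm (U.drop k)) :
    (PySem.List.pyRange 0 (U.length : Int)).foldl
      (fun acc i => pvPairF U dp (U.length : Int) acc (PySem.List.pyGetD U i (0, 0, 0))) maxx =
      U.foldl (pvG U) maxx := by
  rw [PySem.List.foldl_pyRange_zero_pyGetD' U (0, 0, 0) (pvPairF U dp (U.length : Int)) maxx]
  apply PySem.List.foldl_congr_mem
  intro acc t ht
  unfold pvPairF pvG
  have hb1 := pvBnd_le_length U t.2.1
  rw [pvFindA_eq_bnd (U.length + 1) U t.2.1 0 (U.length : Int) hsort (le_refl 0) (by omega)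
      (by omega) (by omega) (by omega) (by omega)]
  by_cases hlt : pvBnd U t.2.1 < U.length
  · rw [if_pos (by exact_mod_cast hlt), if_pos hlt, hdp _ hlt]
  · rw [if_neg (by omega), if_neg hlt]

-- A computes the abstract fold from the base value
theorem pvA_eq (T : List (Int × Int)) (S : List Int) (o : Int) (hne : T ≠ []) :
    reklamy_wz T S o = (pvSort3 T S).foldl (pvG (pvSort3 T S))
      (if T.length = 1 then 0 else max 0 (pvSm (pvSort3 T S))) := by
  have hUlen : (pvSort3 T S).length = T.length := pvSort3_length T S
  have hpos : 0 < T.length := List.length_pos_iff.mpr hne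
  have hUne : pvSort3 T S ≠ [] := by
    intro h0; rw [h0] at hUlen; simp at hUlen; omega
  have hsort := pvSort3_pairwise T S
  simp only [reklamy_wz]
  rw [show ((T.length : Nat) : Int) = ((pvSort3 T S).length : Int) by rw [hUlen]]
  have hdp1 := pvDp1_char (pvSort3 T S) hUne
  rcases Nat.lt_or_ge T.length 2 with h1 | h2
  · -- T.length = 1: the dp loop range is empty
    have hT1 : T.length = 1 := by omega
    rw [PySem.List.pyRange_neg_one_eq_nil (by rw [hUlen, hT1]; norm_num)]
    simp only [List.foldl_nil]
    rw [pvA_second _ _ _ hsort (fun k hk => hdp1 k hk (by omega))]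
    rw [if_pos hT1]
  · -- T.length ≥ 2: run the dp loop
    have hcast : ((pvSort3 T S).length : Int) - 2 = ((T.length - 2 : Nat) : Int) := by
      rw [hUlen]; omega
    rw [hcast]
    have hloop := pvDpLoop (pvSort3 T S) (T.length - 2)
      (PySem.List.pySetD ((PySem.List.pyRange 0 ((pvSort3 T S).length : Int)).map (fun _ => (0 : Int)))
        (((pvSort3 T S).length : Int) - 1)
        (PySem.List.pyGetD (pvSort3 T S) (((pvSort3 T S).length : Int) - 1) (0, 0, 0)).2.2) 0
      (by rw [hUlen]; omega)
      (by rw [PySem.List.length_pySetD, pvDp0_length]; omega)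
      (fun k hak hk => hdp1 k hk (by omega))
    rw [pvA_second _ _ _ hsort hloop.1, hloop.2, if_neg (by omega)]

-- B computes the same abstract fold from max 0 (pvSm U)
theorem pvB_eq (T : List (Int × Int)) (S : List Int) (o : Int) (hne : T ≠ []) :
    reklamy_wz_alt T S o = (pvSort3 T S).foldl (pvG (pvSort3 T S))
      (max 0 (pvSm (pvSort3 T S))) := by
  have hUlen : (pvSort3 T S).length = T.length := pvSort3_length T S
  have hpos : 0 < T.length := List.length_pos_iff.mpr hne
  have hUne : pvSort3 T S ≠ [] := by
    intro h0; rw [h0] at hUlen; simp at hUlen; omega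
  have hsort := pvSort3_pairwise T S
  simp only [reklamy_wz_alt]
  rw [PySem.List.pyGetD_neg_one (pvSort3 T S) (0, 0, 0) hUne]
  rw [pvSufLoop (pvSort3 T S) _ [] hUne (le_refl _)]
  simp only [List.nil_append]
  rw [pvSweepLoop (pvSort3 T S) (pvDs (pvSort3 T S)).reverse hsort
      (fun k hk => pvDs_rev_getD (pvSort3 T S) k hk) _
      (PySem.List.sorted_pairwise (pvSort3 T S) (fun t => t.2.1)) 0 _
      (fun t _ => Nat.zero_le _)]
  exact @List.Perm.foldl_eq _ _ (pvG (pvSort3 T S)) _ _ ⟨fun b x y => pvG_rcomm _ b x y⟩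
    (PySem.List.sorted_perm (pvSort3 T S) (fun t => t.2.1) false) _

-- the sorted triple list of a single interval
theorem pvSort3_single (a b s : Int) (rest : List Int) :
    pvSort3 [(a, b)] (s :: rest) = [(a, b, s)] := by
  unfold pvSort3
  simp [PySem.List.pyRange_one, List.range_succ, PySem.List.pyGetD, PySem.List.pyGet?,
    PySem.List.pyIdx?, PySem.List.sorted_eq_foldl_insertBy, PySem.List.insertBy]

-- on a singleton T both results are explicit
theorem pvAB_single (a b s o : Int) (rest : List Int) :
    reklamy_wz [(a, b)] (s :: rest) o = (if b < a then max (s + s) 0 else 0) ∧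
    reklamy_wz_alt [(a, b)] (s :: rest) o =
      (if b < a then max (s + s) (max 0 s) else max 0 s) := by
  have hA := pvA_eq [(a, b)] (s :: rest) o (by simp)
  have hB := pvB_eq [(a, b)] (s :: rest) o (by simp)
  rw [pvSort3_single a b s rest] at hA hB
  simp only [List.length_cons, List.length_nil, if_pos rfl] at hA
  constructor
  · rw [hA]
    simp only [List.foldl_cons, List.foldl_nil, pvG, pvBnd]
    split_ifs <;> simp_all [pvSm]
  · rw [hB]
    simp only [List.foldl_cons, List.foldl_nil, pvG, pvBnd]
    split_ifs <;> simp_all [pvSm]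

-- ===== VERDICT (by name: the statement is the Claim_ definition above) =====
theorem reklamy_wz_spec : Claim_unchanged_reklamy_wz := by
  intro T S o _ hpre
  unfold Spec_reklamy_wz
  intro hnd
  by_cases h1 : T.length = 1
  · -- singleton T: compare the two explicit values under ¬ D_
    obtain ⟨⟨a, b⟩, hT⟩ : ∃ t, T = [t] := List.length_eq_one_iff.mp h1
    obtain ⟨s, rest, hS⟩ : ∃ s rest, S = s :: rest := by
      cases S with
      | nil => exfalso; have := hpre.2; rw [hT] at this; simp at this
      | cons s rest => exact ⟨s, rest, rfl⟩
    subst hT hS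
    simp only [D_reklamy_wz, List.length_cons, List.length_nil, List.headD_cons,
      not_and, not_lt] at hnd
    have hAB := pvAB_single a b s o rest
    rw [hAB.1, hAB.2]
    by_cases hab : b < a
    · rw [if_pos hab, if_pos hab]; omega
    · rw [if_neg hab, if_neg hab]
      have hs := hnd (by trivial) (by omega)
      omega
  · rw [pvA_eq T S o hpre.1, pvB_eq T S o hpre.1, if_neg h1]

theorem reklamy_wz_changed : Claim_changed_reklamy_wz := by
  unfold Claim_changed_reklamy_wz
  refine ⟨by decide, by decide, by decide, ?_, ?_, by decide⟩
  · exact ((pvAB_single 0 1 5 0 []).1).trans (by norm_num [pvDiffWitnessOut_reklamy_wz])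
  · exact ((pvAB_single 0 1 5 0 []).2).trans (by norm_num [pvDiffWitnessOut_reklamy_wz])

theorem reklamy_wz_tight : Claim_exact_reklamy_wz := by
  intro T S o _ hpre hd
  obtain ⟨h1, hab, hs⟩ := hd
  obtain ⟨⟨a, b⟩, hT⟩ : ∃ t, T = [t] := List.length_eq_one_iff.mp h1
  obtain ⟨s, rest, hS⟩ : ∃ s rest, S = s :: rest := by
    cases S with
    | nil => exfalso; have := hpre.2; rw [hT] at this; simp at this
    | cons s rest => exact ⟨s, rest, rfl⟩
  subst hT hS
  simp only [List.headD_cons] at hab hs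
  have hAB := pvAB_single a b s o rest
  rw [hAB.1, hAB.2, if_neg (by omega), if_neg (by omega)]
  omega
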